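-- pv_equiv track=rewrite | github.com/Xyayetwhe/fb-labs-2020 | tasks/crypto_cp_2/rudnik_fb-82_summovska_fb-82_cp2/vigenerehack.py | split_by_keylen
-- ===== SOURCE A (Python) =====
-- def split_by_keylen(ciphertext,keylen):
--     arr_of_parts = []
--     for i in range(0,keylen):
--         part_str = ''
--         for j in range(i,len(ciphertext),keylen):
--             part_str += ciphertext[j]
--         arr_of_parts.append(part_str)
--     return arr_of_parts
-- ===== SOURCE B (Python) =====
-- def split_by_keylen(ciphertext, keylen):
--     if keylen <= 0:
--         return []
--     parts = [''] * keylen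
--     r = 0
--     for ch in ciphertext:
--         parts[r] += ch
--         r += 1
--         if r == keylen:
--             r = 0
--     return parts
-- ===== Notes on version B (the rewrite author's own statement) =====
-- stated objective: alternative
-- what changed: one round-robin scatter pass over the ciphertext into keylen accumulators instead of keylen separate strided gather passes over the ciphertext
import Mathlib
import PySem

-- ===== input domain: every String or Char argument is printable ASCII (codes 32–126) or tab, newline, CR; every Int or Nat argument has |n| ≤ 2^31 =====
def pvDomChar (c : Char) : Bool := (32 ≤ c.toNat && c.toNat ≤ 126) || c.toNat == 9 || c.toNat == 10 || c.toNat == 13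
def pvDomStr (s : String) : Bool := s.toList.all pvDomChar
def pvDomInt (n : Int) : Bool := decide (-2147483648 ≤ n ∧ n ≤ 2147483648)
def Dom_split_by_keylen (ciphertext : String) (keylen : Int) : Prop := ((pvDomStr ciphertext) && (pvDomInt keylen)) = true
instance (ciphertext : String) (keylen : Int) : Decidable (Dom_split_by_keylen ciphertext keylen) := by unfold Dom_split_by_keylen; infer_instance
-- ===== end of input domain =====

-- B replaces A's keylen strided gather passes by one round-robin scatter pass over the
-- ciphertext into keylen accumulators (objective: alternative decomposition, same cost).

-- ===== PORT A =====
-- part_str is carried as a List Char and packed with String.ofList at the end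
-- (Lean's own String.append is opaque to the kernel); ciphertext[j] is
-- PySem.List.pyGetD on ciphertext.toList — always in range here, so exact.
def split_by_keylen (ciphertext : String) (keylen : Int) : List String :=
  (PySem.List.pyRange 0 keylen 1).foldl
    (fun arr_of_parts i =>
      arr_of_parts ++ [String.ofList
        ((PySem.List.pyRange i (PySem.Str.len ciphertext) keylen).foldl
          (fun part_str j => part_str ++ [PySem.List.pyGetD ciphertext.toList j ' ']) [])])
    []

-- ===== PORT B =====
-- parts is carried as List (List Char) and packed with String.ofList at the end;
-- parts[r] += ch is PySem.List.pySetD/pyGetD at the running Int index r.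
def split_by_keylen_alt (ciphertext : String) (keylen : Int) : List String :=
  if keylen ≤ 0 then []
  else
    ((ciphertext.toList.foldl
        (fun (st : List (List Char) × Int) ch =>
          (PySem.List.pySetD st.1 st.2 (PySem.List.pyGetD st.1 st.2 [] ++ [ch]),
           if st.2 + 1 = keylen then 0 else st.2 + 1))
        (List.replicate keylen.toNat [], 0)).1).map String.ofList

-- ===== PRECONDITION & SPEC =====
def Spec_split_by_keylen (ciphertext : String) (keylen : Int) (out : List String) : Prop := out = split_by_keylen_alt ciphertext keylen
instance (ciphertext : String) (keylen : Int) (out : List String) : Decidable (Spec_split_by_keylen ciphertext keylen out) := by unfold Spec_split_by_keylen; infer_instance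

-- ===== CLAIM (what is proved, stated in full; the proofs are below) =====
def Claim_equal_split_by_keylen : Prop := ∀ (ciphertext : String) (keylen : Int), Dom_split_by_keylen ciphertext keylen → Spec_split_by_keylen ciphertext keylen (split_by_keylen ciphertext keylen)

-- ===== LEMMAS AND PROOFS =====

-- bucketF k i l = the characters of l at positions i, i+k, i+2k, …
-- (i is the countdown to the next picked position; the common spec of both programs).
def bucketF (k : Nat) : Nat → List Char → List Char
  | _, [] => []
  | 0, c :: cs => c :: bucketF k (k - 1) cs
  | i + 1, _ :: cs => bucketF k i cs

lemma bucketF_nil (k i : Nat) : bucketF k i [] = [] := by cases i <;> rfl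

lemma bucketF_zero_cons (k : Nat) (c : Char) (cs : List Char) :
    bucketF k 0 (c :: cs) = c :: bucketF k (k - 1) cs := rfl

lemma bucketF_succ_cons (k i : Nat) (c : Char) (cs : List Char) :
    bucketF k (i + 1) (c :: cs) = bucketF k i cs := rfl

lemma bucketF_of_le (k : Nat) (l : List Char) : ∀ i, l.length ≤ i → bucketF k i l = [] := by
  induction l with
  | nil => intro i _; exact bucketF_nil k i
  | cons c cs ih =>
    intro i h
    cases i with
    | zero => simp at h
    | succ j => rw [bucketF_succ_cons]; exact ih j (by simp at h; omega)

lemma bucketF_step (k : Nat) (hk : 0 < k) (l : List Char) :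
    ∀ (i : Nat) (h : i < l.length), bucketF k i l = l[i] :: bucketF k (i + k) l := by
  induction l with
  | nil => intro i h; simp at h
  | cons c cs ih =>
    intro i h
    cases i with
    | zero =>
      obtain ⟨m, rfl⟩ : ∃ m, k = m + 1 := ⟨k - 1, by omega⟩
      rw [bucketF_zero_cons]
      simp [bucketF_succ_cons]
    | succ i =>
      rw [bucketF_succ_cons, ih i (by simp at h; omega)]
      have h1 : i + 1 + k = (i + k) + 1 := by omega
      rw [h1, bucketF_succ_cons]
      simp

-- range(a, b, s) for a positive step s: empty / cons forms.
lemma strideRange_nil (a b s : Int) (hs : 0 < s) (h : b ≤ a) :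
    PySem.List.pyRange a b s = [] := by
  rw [PySem.List.pyRange_of_pos _ _ hs, if_neg (by omega)]
  simp

lemma strideRange_cons (a b s : Int) (hs : 0 < s) (hab : a < b) :
    PySem.List.pyRange a b s = a :: PySem.List.pyRange (a + s) b s := by
  rw [PySem.List.pyRange_of_pos _ _ hs, PySem.List.pyRange_of_pos _ _ hs]
  have hq : (b - a + s - 1) / s = (b - a - 1) / s + 1 := by
    have h1 : b - a + s - 1 = (b - a - 1) + 1 * s := by ring
    rw [h1, Int.add_mul_ediv_right _ _ (by omega : s ≠ 0)]
  have hq0 : 0 ≤ (b - a - 1) / s := Int.ediv_nonneg (by omega) (by omega)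
  by_cases h2 : a + s < b
  · rw [if_pos hab, if_pos h2]
    have harg : b - (a + s) + s - 1 = b - a - 1 := by ring
    rw [harg, hq]
    have h3 : ((b - a - 1) / s + 1).toNat = ((b - a - 1) / s).toNat + 1 := by omega
    rw [h3, List.range_succ_eq_map]
    simp only [List.map_cons, List.map_map, Nat.cast_zero, mul_zero, add_zero]
    congr 1
    apply List.map_congr_left
    intro x _
    simp only [Function.comp_apply]
    push_cast
    ring
  · rw [if_pos hab, if_neg h2]
    have h3 : (b - a - 1) / s = 0 := Int.ediv_eq_zero_of_lt (by omega) (by omega)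
    rw [hq, h3]
    simp

-- A's inner loop: the strided gather starting at i collects exactly bucketF k i l.
lemma gatherA (k : Nat) (hk : 0 < k) (l : List Char) :
    ∀ (fuel i : Nat) (acc : List Char), l.length ≤ i + fuel →
      (PySem.List.pyRange (i : Int) (l.length : Int) (k : Int)).foldl
        (fun part_str j => part_str ++ [PySem.List.pyGetD l j ' ']) acc
      = acc ++ bucketF k i l := by
  intro fuel
  induction fuel with
  | zero =>
    intro i acc h
    have hle : l.length ≤ i := by omega
    rw [strideRange_nil _ _ _ (by exact_mod_cast hk) (by exact_mod_cast hle),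
      List.foldl_nil, bucketF_of_le k l i hle, List.append_nil]
  | succ f ih =>
    intro i acc h
    by_cases hi : i < l.length
    · rw [strideRange_cons _ _ _ (by exact_mod_cast hk) (by exact_mod_cast hi),
        List.foldl_cons]
      have hcast : (i : Int) + (k : Int) = ((i + k : Nat) : Int) := by push_cast; ring
      rw [hcast, ih (i + k) _ (by omega)]
      rw [PySem.List.pyGetD_natCast, List.getD_eq_getElem l ' ' hi, bucketF_step k hk l i hi]
      simp
    · have hle : l.length ≤ i := by omega
      rw [strideRange_nil _ _ _ (by exact_mod_cast hk) (by exact_mod_cast hle),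
        List.foldl_nil, bucketF_of_le k l i hle, List.append_nil]

-- B's loop invariant: after scattering l round-robin from bucket r, bucket i holds its
-- old contents followed by bucketF k (distance from r to i) l.
lemma scatter_get (k : Nat) (hk : 0 < k) (l : List Char) :
    ∀ (parts : List (List Char)) (r : Nat), parts.length = k → r < k → ∀ i : Nat,
      ((l.foldl
          (fun (st : List (List Char) × Int) ch =>
            (PySem.List.pySetD st.1 st.2 (PySem.List.pyGetD st.1 st.2 [] ++ [ch]),
             if st.2 + 1 = (k : Int) then 0 else st.2 + 1))
          (parts, (r : Int))).1)[i]?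
      = (parts[i]?).map (fun p => p ++ bucketF k (if r ≤ i then i - r else i + k - r) l) := by
  induction l with
  | nil =>
    intro parts r hlen hr i
    simp only [List.foldl_nil, bucketF_nil, List.append_nil]
    cases parts[i]? <;> simp
  | cons c cs ih =>
    intro parts r hlen hr i
    have hrlen : r < parts.length := by omega
    have hidx : (if (r : Int) + 1 = (k : Int) then (0 : Int) else (r : Int) + 1)
        = ((if r + 1 = k then 0 else r + 1 : Nat) : Int) := by
      by_cases h : r + 1 = k
      · rw [if_pos (by exact_mod_cast h), if_pos h]; simp
      · rw [if_neg (fun hc => h (by exact_mod_cast hc)), if_neg h]; push_cast; ring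
    rw [List.foldl_cons]
    simp only [PySem.List.pySetD_natCast, PySem.List.pyGetD_natCast,
      List.getD_eq_getElem parts [] hrlen, hidx]
    rw [ih (parts.set r (parts[r] ++ [c])) (if r + 1 = k then 0 else r + 1)
        (by simpa using hlen) (by split <;> omega) i]
    by_cases hik : i < k
    · by_cases hir : i = r
      · subst hir
        rw [List.getElem?_set_self' ]
        have hcd' : (if (if i + 1 = k then 0 else i + 1) ≤ i then i - (if i + 1 = k then 0 else i + 1)
            else i + k - (if i + 1 = k then 0 else i + 1)) = k - 1 := by
          split_ifs <;> omega
        have hcd : (if i ≤ i then i - i else i + k - i) = 0 := by simp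
        rw [hcd', hcd, bucketF_zero_cons]
        rw [List.getElem?_eq_getElem hrlen]
        simp
      · rw [List.getElem?_set_ne (by omega : r ≠ i)]
        have hcd : (if r ≤ i then i - r else i + k - r)
            = (if (if r + 1 = k then 0 else r + 1) ≤ i then i - (if r + 1 = k then 0 else r + 1)
               else i + k - (if r + 1 = k then 0 else r + 1)) + 1 := by
          split_ifs <;> omega
        rw [hcd, bucketF_succ_cons]
    · have h1 : parts[i]? = none := by rw [List.getElem?_eq_none] ; omega
      have h2 : (parts.set r (parts[r] ++ [c]))[i]? = none := by
        rw [List.getElem?_eq_none] ; simp; omega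
      rw [h1, h2]
      simp

-- ===== VERDICT (by name: the statement is the Claim_ definition above) =====
theorem split_by_keylen_spec : Claim_equal_split_by_keylen := by
  intro ciphertext keylen _hdom
  unfold Spec_split_by_keylen split_by_keylen split_by_keylen_alt
  by_cases hk : keylen ≤ 0
  · rw [if_pos hk, PySem.List.pyRange_one_eq_nil hk, List.foldl_nil]
  · rw [not_le] at hk
    rw [if_neg (by omega)]
    have hkeq : keylen = (keylen.toNat : Int) := by omega
    set K := keylen.toNat with hKdef
    have hK0 : 0 < K := by omega
    set l := ciphertext.toList with hl
    rw [hkeq]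
    -- A side: outer fold is a map over range K, each entry is a bucketF by gatherA
    rw [PySem.List.foldl_append_singleton_eq_map, List.nil_append,
      PySem.List.pyRange_zero_nat, List.map_map]
    have hA : ∀ i ∈ List.range K,
        String.ofList ((PySem.List.pyRange ((i : Nat) : Int) (PySem.Str.len ciphertext) ((K : Nat) : Int)).foldl
          (fun part_str j => part_str ++ [PySem.List.pyGetD l j ' ']) [])
        = String.ofList (bucketF K i l) := by
      intro i _
      rw [PySem.Str.len_eq, ← hl,
        gatherA K hK0 l l.length i [] (by omega), List.nil_append]
    -- B side: the scattered buckets are exactly the bucketF's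
    have hB : ((l.foldl
          (fun (st : List (List Char) × Int) ch =>
            (PySem.List.pySetD st.1 st.2 (PySem.List.pyGetD st.1 st.2 [] ++ [ch]),
             if st.2 + 1 = (K : Int) then 0 else st.2 + 1))
          (List.replicate K [], ((0 : Nat) : Int))).1)
        = (List.range K).map (fun i => bucketF K i l) := by
      apply List.ext_getElem?
      intro i
      rw [scatter_get K hK0 l (List.replicate K []) 0 (by simp) hK0 i]
      by_cases hik : i < K
      · simp [hik]
      · simp [hik]
    rw [show ((0 : Nat) : Int) = (0 : Int) from rfl] at hB
    rw [hB, List.map_map]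
    simp only [Function.comp_def]
    exact List.map_congr_left hA
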